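-- pv_equiv track=rewrite | github.com/alessioC42/BWINF41 | Round2/A3 - Pancake Sort/puwe-calc/python_prototype/main.py | reisverschluss
-- ===== SOURCE A (Python) =====
-- def reisverschluss(n):
--     half = (n // 2)
--     a = list(range(1, half+1))
--     b = list(range(half+1, n+1))
--     a.reverse()
--     b.reverse()
--     res = []
--     for i in range(0, len(b)):
--         res.append(b[i])
--         try:
--             res.append(a[i])
--         except:
--             return res
--     return res
-- ===== SOURCE B (Python) =====
-- def reisverschluss(n):
--     half = n // 2
--     res = [0] * n
--     res[0::2] = range(n, half, -1)
--     res[1::2] = range(half, 0, -1)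
--     return res
-- ===== Notes on version B (the rewrite author's own statement) =====
-- stated objective: idiomatic
-- what changed: Replaces the index loop with try/except early-return by pre-allocating [0]*n and filling even and odd positions with two strided slice assignments from descending ranges.
import Mathlib
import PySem

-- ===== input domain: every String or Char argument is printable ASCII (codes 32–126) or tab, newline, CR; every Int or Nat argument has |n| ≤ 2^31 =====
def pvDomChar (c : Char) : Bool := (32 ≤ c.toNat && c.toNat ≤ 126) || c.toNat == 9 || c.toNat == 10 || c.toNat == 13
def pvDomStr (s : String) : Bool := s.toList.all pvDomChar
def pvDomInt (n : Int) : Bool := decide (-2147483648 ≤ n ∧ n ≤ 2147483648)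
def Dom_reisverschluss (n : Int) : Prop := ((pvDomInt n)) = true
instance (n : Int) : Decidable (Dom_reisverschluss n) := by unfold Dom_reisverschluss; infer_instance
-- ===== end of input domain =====

-- B replaces A's interleave loop with its try/except early return by pre-allocating a
-- zero list and filling the even and odd positions with two strided slice assignments
-- from descending ranges (objective: idiomatic; same O(n) cost).

-- ===== PORT A =====
-- the 'for i in range(0, len(b)): res.append(b[i]); try: res.append(a[i]) except: return res' loop
def reisverschlussLoop (b a : List Int) (i : Nat) (res : List Int) : List Int :=
  if h : i < b.length then
    match a[i]? with                       -- a[i] raises IndexError exactly when a[i]? = none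
    | some v => reisverschlussLoop b a (i + 1) (res ++ [b[i]] ++ [v])
    | none => res ++ [b[i]]
  else res
termination_by b.length - i

def reisverschluss (n : Int) : List Int :=
  let half := PySem.Int.floordiv n 2
  let a := PySem.List.pyRange 1 (half + 1) 1
  let b := PySem.List.pyRange (half + 1) (n + 1) 1
  let a := a.reverse
  let b := b.reverse
  reisverschlussLoop b a 0 []

-- ===== PORT B =====
-- res[0::2] = s  (strided slice assignment; lengths always match in B's use)
def pvAssignEven : List Int → List Int → List Int
  | _ :: y :: rest, s :: ss => s :: y :: pvAssignEven rest ss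
  | _ :: [], s :: _ => [s]
  | xs, _ => xs

-- res[1::2] = t
def pvAssignOdd (res t : List Int) : List Int :=
  match res with
  | [] => []
  | x :: rest => x :: pvAssignEven rest t

def reisverschluss_alt (n : Int) : List Int :=
  let half := PySem.Int.floordiv n 2
  let res := List.replicate n.toNat 0
  let res := pvAssignEven res (PySem.List.pyRange n half (-1))
  pvAssignOdd res (PySem.List.pyRange half 0 (-1))

-- ===== PRECONDITION & SPEC =====
def Spec_reisverschluss (n : Int) (out : List Int) : Prop := out = reisverschluss_alt n
instance (n : Int) (out : List Int) : Decidable (Spec_reisverschluss n out) := by unfold Spec_reisverschluss; infer_instance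

-- ===== CLAIM (what is proved, stated in full; the proofs are below) =====
def Claim_equal_reisverschluss : Prop := ∀ (n : Int), Dom_reisverschluss n → Spec_reisverschluss n (reisverschluss n)

-- ===== LEMMAS AND PROOFS =====

-- the common value: interleave s t starting with s (s may be one longer)
def pvInterleave : List Int → List Int → List Int
  | [], _ => []
  | x :: xs, ys => x :: pvInterleave ys xs
termination_by s t => s.length + t.length
decreasing_by simp; omega

lemma reisverschlussLoop_eq (b a : List Int) (hlen : b.length ≤ a.length + 1) :
    ∀ (i : Nat) (res : List Int),
      reisverschlussLoop b a i res = res ++ pvInterleave (b.drop i) (a.drop i) := by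
  intro i
  induction hk : b.length - i using Nat.strong_induction_on generalizing i with
  | _ k ih =>
  intro res
  rw [reisverschlussLoop]
  by_cases hi : i < b.length
  · rw [dif_pos hi]
    have hbd : b.drop i = b[i] :: b.drop (i + 1) := (List.getElem_cons_drop hi).symm
    cases hgo : a[i]? with
    | some v =>
      have hia : i < a.length := by
        by_contra h
        simp [List.getElem?_eq_none (by omega : a.length ≤ i)] at hgo
      have hv : v = a[i] := by
        rw [List.getElem?_eq_getElem hia] at hgo
        exact (Option.some.inj hgo).symm
      have had : a.drop i = a[i] :: a.drop (i + 1) := (List.getElem_cons_drop hia).symm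
      show reisverschlussLoop b a (i + 1) (res ++ [b[i]] ++ [v]) = _
      rw [ih (b.length - (i + 1)) (by omega) (i + 1) rfl]
      rw [hbd, had, pvInterleave, pvInterleave]
      simp [hv]
    | none =>
      have hia : a.length ≤ i := by
        by_contra h
        simp [List.getElem?_eq_getElem (by omega : i < a.length)] at hgo
      have hbd1 : b.drop i = [b[i]] := by
        rw [hbd]
        simp [List.drop_eq_nil_of_le (by omega : b.length ≤ i + 1)]
      have had : a.drop i = ([] : List Int) := List.drop_eq_nil_of_le hia
      show res ++ [b[i]] = _
      rw [hbd1, had, pvInterleave, pvInterleave]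
  · rw [dif_neg hi]
    rw [List.drop_eq_nil_of_le (by omega), pvInterleave, List.append_nil]

lemma length_pvAssignEven : ∀ (r s : List Int), (pvAssignEven r s).length = r.length := by
  intro r s
  induction r, s using pvAssignEven.induct with
  | case1 x y rest s ss ih => simp [pvAssignEven, ih]
  | case2 => simp [pvAssignEven]
  | case3 xs s h => cases xs <;> cases s <;> simp_all [pvAssignEven]

lemma pvAssign_eq_interleave : ∀ (s t r : List Int),
    r.length = s.length + t.length → t.length ≤ s.length → s.length ≤ t.length + 1 →
    pvAssignOdd (pvAssignEven r s) t = pvInterleave s t := by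
  intro s
  induction s with
  | nil =>
    intro t r hr ht _
    cases t with
    | cons _ _ => simp at ht
    | nil =>
      cases r with
      | cons _ _ => simp at hr
      | nil => simp [pvAssignEven, pvAssignOdd, pvInterleave]
  | cons s0 ss ih =>
    intro t r hr ht hs
    simp only [List.length_cons] at hr ht hs
    cases t with
    | nil =>
      simp only [List.length_nil] at hr hs ht
      cases ss with
      | cons _ _ => simp only [List.length_cons] at hs; omega
      | nil =>
        cases r with
        | nil => simp at hr
        | cons r0 rt =>
          cases rt with
          | cons _ _ => simp at hr
          | nil => simp [pvAssignEven, pvAssignOdd, pvInterleave]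
    | cons t0 ts =>
      simp only [List.length_cons] at hr ht hs
      cases r with
      | nil => simp only [List.length_nil] at hr; omega
      | cons r0 rt =>
        cases rt with
        | nil => simp only [List.length_cons, List.length_nil] at hr; omega
        | cons r1 rr =>
          simp only [List.length_cons] at hr
          have hrr : rr.length = ss.length + ts.length := by omega
          have key := ih ts rr hrr (by omega) (by omega)
          show pvAssignOdd (s0 :: r1 :: pvAssignEven rr ss) (t0 :: ts)
                = pvInterleave (s0 :: ss) (t0 :: ts)
          cases hcase : pvAssignEven rr ss with
          | nil =>
            have hlen := length_pvAssignEven rr ss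
            rw [hcase] at hlen
            have hrrlen : rr.length = 0 := by simpa using hlen.symm
            have hss0 : ss = [] := by
              cases ss with
              | nil => rfl
              | cons _ _ => exfalso; simp only [List.length_cons] at hrr; omega
            have hts0 : ts = [] := by
              cases ts with
              | nil => rfl
              | cons _ _ => exfalso; simp only [List.length_cons] at hrr; omega
            subst hss0; subst hts0
            have hrr0 : rr = [] := by
              cases rr with
              | nil => rfl
              | cons _ _ => exfalso; simp only [List.length_cons] at hrr; omega
            subst hrr0
            rw [pvInterleave, pvInterleave, pvInterleave]
            simp [pvAssignOdd, pvAssignEven]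
          | cons u us =>
            rw [hcase] at key
            rw [pvInterleave, pvInterleave]
            show s0 :: pvAssignEven (r1 :: u :: us) (t0 :: ts) = _
            rw [show pvAssignEven (r1 :: u :: us) (t0 :: ts) = t0 :: u :: pvAssignEven us ts from rfl]
            simp only [pvAssignOdd] at key
            rw [key]

lemma reisverschluss_half_eq (n : Int) : PySem.Int.floordiv n 2 = n / 2 := by
  simp [PySem.Int.floordiv, Int.fdiv_eq_ediv]

-- ===== VERDICT (by name: the statement is the Claim_ definition above) =====
theorem reisverschluss_spec : Claim_equal_reisverschluss := by
  intro n _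
  unfold Spec_reisverschluss reisverschluss reisverschluss_alt
  have hq := reisverschluss_half_eq n
  have hb : PySem.List.pyRange n (PySem.Int.floordiv n 2) (-1)
      = (PySem.List.pyRange (PySem.Int.floordiv n 2 + 1) (n + 1) 1).reverse := by
    simpa using PySem.List.pyRange_neg_one_eq_reverse n (PySem.Int.floordiv n 2)
  have ha : PySem.List.pyRange (PySem.Int.floordiv n 2) 0 (-1)
      = (PySem.List.pyRange 1 (PySem.Int.floordiv n 2 + 1) 1).reverse := by
    simpa using PySem.List.pyRange_neg_one_eq_reverse (PySem.Int.floordiv n 2) 0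
  simp only []
  rw [← hb, ← ha]
  have hlb := PySem.List.length_pyRange_neg_one n (PySem.Int.floordiv n 2)
  have hla := PySem.List.length_pyRange_neg_one (PySem.Int.floordiv n 2) 0
  rw [reisverschlussLoop_eq _ _ (by rw [hlb, hla]; rw [hq] at *; omega) 0 []]
  simp only [List.drop_zero, List.nil_append]
  rw [pvAssign_eq_interleave _ _ _
      (by rw [List.length_replicate, hlb, hla]; rw [hq] at *; omega)
      (by rw [hlb, hla]; rw [hq] at *; omega)
      (by rw [hlb, hla]; rw [hq] at *; omega)]
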